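-- pv_equiv track=rewrite | github.com/tomknightatl/diocesan-vitality | extractors/enhanced_base_extractor.py | _group_selectors_by_complexity
-- ===== SOURCE A (Python) =====
-- from typing import Any, Dict, List, Optional
--
-- def _group_selectors_by_complexity(selectors: List[str]) -> List[List[str]]:
--     """Group selectors by complexity for progressive extraction."""
--     # Simple selectors (class-based, high probability)
--     simple = [s for s in selectors if s.startswith(".") and len(s.split()) == 1]
--
--     # Medium selectors (id-based, multi-class, attribute-based)
--     medium = [
--         s
--         for s in selectors
--         if (s.startswith("#") or ("[" in s and "]" in s) or (s.startswith(".") and len(s.split()) > 1))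
--     ]
--
--     # Complex selectors (descendant, multiple conditions)
--     complex_selectors = [s for s in selectors if s not in simple and s not in medium]
--
--     # Return in order of increasing complexity
--     groups = []
--     if simple:
--         groups.append(simple[:5])  # Top 5 simple selectors
--     if medium:
--         groups.append(medium[:5])  # Top 5 medium selectors
--     if complex_selectors:
--         groups.append(complex_selectors[:3])  # Top 3 complex selectors
--
--     return groups
-- ===== SOURCE B (Python) =====
-- from typing import List
--
--
-- def _group_selectors_by_complexity(selectors: List[str]) -> List[List[str]]:
--     """Group selectors by complexity: one bounded pass keeping at most 5/5/3
--     entries per bucket and stopping as soon as every bucket is full."""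
--     simple, medium, cpx = [], [], []
--     for s in selectors:
--         if len(simple) >= 5 and len(medium) >= 5 and len(cpx) >= 3:
--             break
--         is_simple = s.startswith(".") and len(s.split()) == 1
--         is_medium = s.startswith("#") or ("[" in s and "]" in s) or (s.startswith(".") and len(s.split()) > 1)
--         if is_simple and len(simple) < 5:
--             simple.append(s)
--         if is_medium and len(medium) < 5:
--             medium.append(s)
--         if not is_simple and not is_medium and len(cpx) < 3:
--             cpx.append(s)
--     return [b for b in (simple, medium, cpx) if b]
-- ===== Notes on version B (the rewrite author's own statement) =====
-- stated objective: alternative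
-- what changed: Instead of A's three full comprehension scans (the third testing list membership in the first two), B does one bounded pass that appends each selector to a bucket only while that bucket is below its cap (5/5/3), breaks out as soon as all three buckets are full, and emits the non-empty buckets directly with no slicing.
import Mathlib
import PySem

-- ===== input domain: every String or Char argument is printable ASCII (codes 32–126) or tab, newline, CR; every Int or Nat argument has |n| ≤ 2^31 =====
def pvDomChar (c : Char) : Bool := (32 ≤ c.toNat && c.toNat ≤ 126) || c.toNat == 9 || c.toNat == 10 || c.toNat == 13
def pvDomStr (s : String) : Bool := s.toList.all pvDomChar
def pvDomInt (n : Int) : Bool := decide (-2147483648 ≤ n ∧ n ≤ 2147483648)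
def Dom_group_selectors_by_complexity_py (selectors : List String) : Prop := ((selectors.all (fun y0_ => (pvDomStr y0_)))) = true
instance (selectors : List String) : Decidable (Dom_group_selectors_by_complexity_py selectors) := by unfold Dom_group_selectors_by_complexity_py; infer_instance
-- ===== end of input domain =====

-- B replaces A's three full scans (plus a quadratic membership scan) by one bounded pass that
-- keeps at most 5/5/3 entries per bucket and stops once all buckets are full; same return value.
-- ===== PORT A =====
def group_selectors_by_complexity_py (selectors : List String) : List (List String) :=
  -- simple = [s for s in selectors if s.startswith(".") and len(s.split()) == 1]
  let simple := selectors.filter (fun s =>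
    PySem.Str.startswith s "." && (PySem.Str.split₀ s).length == 1)
  -- medium = [s for s in selectors if s.startswith("#") or ("[" in s and "]" in s) or (s.startswith(".") and len(s.split()) > 1)]
  let medium := selectors.filter (fun s =>
    PySem.Str.startswith s "#" || (PySem.Str.isIn "[" s && PySem.Str.isIn "]" s)
      || (PySem.Str.startswith s "." && decide ((PySem.Str.split₀ s).length > 1)))
  -- complex_selectors = [s for s in selectors if s not in simple and s not in medium]
  let complexSelectors := selectors.filter (fun s =>
    !(simple.contains s) && !(medium.contains s))
  -- groups = []; conditional appends of the capped buckets
  let groups : List (List String) := []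
  let groups := if simple.isEmpty then groups
    else groups ++ [PySem.List.slice simple none (some 5)]
  let groups := if medium.isEmpty then groups
    else groups ++ [PySem.List.slice medium none (some 5)]
  let groups := if complexSelectors.isEmpty then groups
    else groups ++ [PySem.List.slice complexSelectors none (some 3)]
  groups


-- ===== PORT B =====
-- one bounded pass: capped appends, early break when all three buckets are full
def pvGoB : List String → List String → List String → List String →
    List String × List String × List String
  | [], simple, medium, cpx => (simple, medium, cpx)
  | s :: rest, simple, medium, cpx =>
    if 5 ≤ simple.length && 5 ≤ medium.length && 3 ≤ cpx.length then
      (simple, medium, cpx)   -- break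
    else
      let isS := PySem.Str.startswith s "." && (PySem.Str.split₀ s).length == 1
      let isM := PySem.Str.startswith s "#" || (PySem.Str.isIn "[" s && PySem.Str.isIn "]" s)
          || (PySem.Str.startswith s "." && decide ((PySem.Str.split₀ s).length > 1))
      pvGoB rest
        (if isS && decide (simple.length < 5) then simple ++ [s] else simple)
        (if isM && decide (medium.length < 5) then medium ++ [s] else medium)
        (if !isS && !isM && decide (cpx.length < 3) then cpx ++ [s] else cpx)

def group_selectors_by_complexity_py_alt (selectors : List String) : List (List String) :=
  let t := pvGoB selectors [] [] []
  ([t.1, t.2.1, t.2.2].filter (fun b => !b.isEmpty))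


-- ===== PRECONDITION & SPEC =====
def Spec_group_selectors_by_complexity_py (selectors : List String) (out : List (List String)) : Prop := out = group_selectors_by_complexity_py_alt selectors
instance (selectors : List String) (out : List (List String)) : Decidable (Spec_group_selectors_by_complexity_py selectors out) := by unfold Spec_group_selectors_by_complexity_py; infer_instance

-- ===== CLAIM (what is proved, stated in full; the proofs are below) =====
def Claim_equal_group_selectors_by_complexity_py : Prop := ∀ (selectors : List String), Dom_group_selectors_by_complexity_py selectors → Spec_group_selectors_by_complexity_py selectors (group_selectors_by_complexity_py selectors)

-- ===== LEMMAS AND PROOFS =====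

-- the classification predicates shared by both programs (proof-side abbreviations)
def pvPS (s : String) : Bool :=
  PySem.Str.startswith s "." && (PySem.Str.split₀ s).length == 1

def pvPM (s : String) : Bool :=
  PySem.Str.startswith s "#" || (PySem.Str.isIn "[" s && PySem.Str.isIn "]" s)
    || (PySem.Str.startswith s "." && decide ((PySem.Str.split₀ s).length > 1))

def pvPC (s : String) : Bool := !pvPS s && !pvPM s

theorem pvFilter_contains_eq {l : List String} {p : String → Bool} {x : String}
    (hx : x ∈ l) : (l.filter p).contains x = p x := by
  cases h : p x <;> simp [List.mem_filter, hx, h]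

-- A's third scan filters by exactly pvPC
theorem pvComplex_filter_eq (l : List String) :
    l.filter (fun s => !((l.filter pvPS).contains s) && !((l.filter pvPM).contains s))
      = l.filter pvPC := by
  apply List.filter_congr
  intro x hx
  rw [pvFilter_contains_eq hx, pvFilter_contains_eq hx]
  rfl

-- unfolding lemma for pvGoB on a cons, phrased with the shared predicates
theorem pvGoB_cons (s : String) (rest a b c : List String) :
    pvGoB (s :: rest) a b c
      = if (decide (5 ≤ a.length) && decide (5 ≤ b.length) && decide (3 ≤ c.length)) then
          (a, b, c)
        else
          pvGoB rest
            (if pvPS s && decide (a.length < 5) then a ++ [s] else a)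
            (if pvPM s && decide (b.length < 5) then b ++ [s] else b)
            (if !pvPS s && !pvPM s && decide (c.length < 3) then c ++ [s] else c) := by
  rw [pvGoB]
  rfl

-- invariant of B's bounded pass: it computes capped prefixes of the three filtered lists
theorem pvGo_eq (rest : List String) (a b c : List String)
    (ha : a.length ≤ 5) (hb : b.length ≤ 5) (hc : c.length ≤ 3) :
    pvGoB rest a b c
      = (a ++ (rest.filter pvPS).take (5 - a.length),
         b ++ (rest.filter pvPM).take (5 - b.length),
         c ++ (rest.filter pvPC).take (3 - c.length)) := by
  induction rest generalizing a b c with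
  | nil => simp [pvGoB]
  | cons s rest ih =>
      rw [pvGoB_cons]
      by_cases hfull : 5 ≤ a.length ∧ 5 ≤ b.length ∧ 3 ≤ c.length
      · have h5 : a.length = 5 := le_antisymm ha hfull.1
        have h5' : b.length = 5 := le_antisymm hb hfull.2.1
        have h3 : c.length = 3 := le_antisymm hc hfull.2.2
        simp [h5, h5', h3]
      · have hguard : (decide (5 ≤ a.length) && decide (5 ≤ b.length) && decide (3 ≤ c.length)) = false := by
          by_cases h1 : 5 ≤ a.length <;> by_cases h2 : 5 ≤ b.length <;> by_cases h3 : 3 ≤ c.length <;>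
            simp [h1, h2, h3] at hfull ⊢
        rw [hguard]
        simp only [Bool.false_eq_true, if_false]
        have ha' : (if pvPS s && decide (a.length < 5) then a ++ [s] else a).length ≤ 5 := by
          split
          next h =>
            simp only [Bool.and_eq_true, decide_eq_true_eq] at h
            have := h.2; simp; omega
          next => exact ha
        have hb' : (if pvPM s && decide (b.length < 5) then b ++ [s] else b).length ≤ 5 := by
          split
          next h =>
            simp only [Bool.and_eq_true, decide_eq_true_eq] at h
            have := h.2; simp; omega
          next => exact hb
        have hc' : (if !pvPS s && !pvPM s && decide (c.length < 3) then c ++ [s] else c).length ≤ 3 := by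
          split
          next h =>
            simp only [Bool.and_eq_true, decide_eq_true_eq] at h
            have := h.2; simp; omega
          next => exact hc
        rw [ih _ _ _ ha' hb' hc']
        simp only [List.filter_cons]
        refine Prod.ext ?_ (Prod.ext ?_ ?_) <;> simp only
        · cases hp : pvPS s
          · simp
          · by_cases hlt : a.length < 5
            · simp [hlt, List.take_succ_cons,
                show 5 - a.length = (5 - (a.length + 1)) + 1 by omega]
            · have h5 : a.length = 5 := by omega
              simp [h5]
        · cases hp : pvPM s
          · simp
          · by_cases hlt : b.length < 5
            · simp [hlt, List.take_succ_cons,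
                show 5 - b.length = (5 - (b.length + 1)) + 1 by omega]
            · have h5 : b.length = 5 := by omega
              simp [h5]
        · cases hps : pvPS s <;> cases hpm : pvPM s
          · by_cases hlt : c.length < 3
            · simp [pvPC, hps, hpm, hlt, List.take_succ_cons,
                show 3 - c.length = (3 - (c.length + 1)) + 1 by omega]
            · have h3 : c.length = 3 := by omega
              simp [pvPC, hps, hpm, h3]
          · simp [pvPC, hps, hpm]
          · simp [pvPC, hps, hpm]
          · simp [pvPC, hps, hpm]

theorem pvSlice_take (l : List String) (k : Nat) :
    PySem.List.slice l none (some (k : Int)) = l.take k := by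
  simp [PySem.List.slice_to_natCast]

theorem pvTake_isEmpty (l : List String) (k : Nat) (hk : 0 < k) :
    (l.take k).isEmpty = l.isEmpty := by
  cases l with
  | nil => simp
  | cons x xs => cases k with
    | zero => omega
    | succ n => simp

-- ===== VERDICT (by name: the statement is the Claim_ definition above) =====
theorem group_selectors_by_complexity_py_spec : Claim_equal_group_selectors_by_complexity_py := by
  intro selectors _
  unfold Spec_group_selectors_by_complexity_py
  unfold group_selectors_by_complexity_py group_selectors_by_complexity_py_alt
  simp only [show (fun s => PySem.Str.startswith s "." && (PySem.Str.split₀ s).length == 1)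
      = pvPS from rfl,
    show (fun s => PySem.Str.startswith s "#" || (PySem.Str.isIn "[" s && PySem.Str.isIn "]" s)
      || (PySem.Str.startswith s "." && decide ((PySem.Str.split₀ s).length > 1)))
      = pvPM from rfl]
  rw [pvComplex_filter_eq, pvGo_eq selectors [] [] [] (by simp) (by simp) (by simp)]
  rw [show ((5 : Int)) = ((5 : Nat) : Int) from rfl, show ((3 : Int)) = ((3 : Nat) : Int) from rfl]
  rw [pvSlice_take, pvSlice_take, pvSlice_take]
  simp only [List.nil_append, List.length_nil, Nat.sub_zero]
  by_cases hS : (selectors.filter pvPS).isEmpty <;>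
    by_cases hM : (selectors.filter pvPM).isEmpty <;>
    by_cases hC : (selectors.filter pvPC).isEmpty <;>
    simp [List.filter, pvTake_isEmpty, hS, hM, hC]
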